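-- pv_equiv track=rewrite | github.com/TobiasBengtsson/AdventOfCode2020 | day14/day14pt2.py | cardinality_union
-- ===== SOURCE A (Python) =====
-- def intersect(address_set_1, address_set_2):
--     # The memory addresses are actually sets of addresses and we
--     # can implement an efficient intersect function.
--     # Ex. 1001X10X1
--     #     10X1XX0XX
--     #     ---------
--     #     1001X10X1
--     if not address_set_1 or not address_set_2:
--         return None
--     intersection = ''
--     for a1, a2 in zip(address_set_1, address_set_2):
--         if a1 == a2:
--             intersection += a1
--         elif a1 == 'X':
--             intersection += a2
--         elif a2 == 'X':
--             intersection += a1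
--         else:
--             # a1 and a2 are different numbers
--             return None
--     return intersection
--
-- def intersect_list(address_sets):
--     # Useful for intersecting 3 or more sets
--     if len(address_sets) > 2:
--         return intersect(address_sets[0], intersect_list(address_sets[1:]))
--     elif len(address_sets) == 2:
--         return intersect(address_sets[0], address_sets[1])
--     elif address_sets:
--         return address_sets[0]
--     else:
--         return None
--
-- def cardinality(address_set):
--     if not address_set:
--         return 0
--
--     return 2 ** address_set.count('X')
--
-- def get_union_idxs(depth, sets_n):
--     # https://proofwiki.org/wiki/Cardinality_of_Set_Union
--     # Returns a list of lists of indices 1 < i1 < i2 < .. < ik < n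
--     # for given depth = k - 1
--     #
--     # E.g.
--     # get_union_idxs(3, 4)
--     # [[0, 1, 2], [0, 1, 3], [0, 2, 3], [1, 2, 3]]
--     if depth == 0:
--         for i in range(sets_n):
--             yield [i]
--         return
--
--     if depth >= sets_n:
--         raise Exception("Depth was greater than number of sets")
--
--     # We build by appending the last ik to the prev. depth
--     # E.g.
--     # prev_depth            depth
--     # [0, 1]                [0, 1, 2]
--     #                       [0, 1, 3]
--     #                       [0, 1, 4]
--     # [0, 2]                [0, 2, 3]
--     #                       [0, 2, 4]
--     # [0, 3]                [0, 3, 4]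
--     # [1, 2]                [1, 2, 3]
--     #                       [1, 2, 4]
--     # ...
--     prev_depth = get_union_idxs(depth - 1, sets_n)
--     for p in prev_depth:
--         i = p[-1] + 1
--         while i < sets_n:
--             p_copy = p.copy()
--             p_copy.append(i)
--             yield p_copy
--             i += 1
--
-- def cardinality_union(sets):
--     # https://proofwiki.org/wiki/Cardinality_of_Set_Union
--
--     rolling_sum = 0
--
--     for depth in range(len(sets)):
--         depth_sum = 0
--         depth_idxs = get_union_idxs(depth, len(sets))
--         for idxs in depth_idxs:
--             l = []
--             for i in idxs:
--                 l.append(sets[i])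
--
--             inter = intersect_list(l)
--             depth_sum += cardinality(inter)
--
--         if depth % 2 == 0:
--             rolling_sum += depth_sum
--         else:
--             rolling_sum -= depth_sum
--
--     return rolling_sum
-- ===== SOURCE B (Python) =====
-- def _merge_chars(a, b):
--     # merge two nonempty mask strings position by position; None on a hard conflict
--     if a == '' or b == '':
--         return ''
--     x, y = a[0], b[0]
--     if x == y or y == 'X':
--         rest = _merge_chars(a[1:], b[1:])
--         return None if rest is None else x + rest
--     if x == 'X':
--         rest = _merge_chars(a[1:], b[1:])
--         return None if rest is None else y + rest
--     return None
--
-- def _merge(a, b):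
--     if not a or not b:
--         return None
--     return _merge_chars(a, b)
--
-- def _reduce(sel):
--     # right-fold merge over a nonempty list of mask strings
--     if len(sel) == 1:
--         return sel[0]
--     rest = _reduce(sel[1:])
--     if rest is None:
--         return None
--     return _merge(sel[0], rest)
--
-- def cardinality_union(sets):
--     n = len(sets)
--     total = 0
--     for mask in range(1, 2 ** n):
--         sel = [sets[i] for i in range(n) if (mask >> i) % 2 == 1]
--         inter = _reduce(sel)
--         if inter is None or inter == '':
--             size = 0
--         else:
--             size = 2 ** inter.count('X')
--         if len(sel) % 2 == 1:
--             total = total + size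
--         else:
--             total = total - size
--     return total
-- ===== Notes on version B (the rewrite author's own statement) =====
-- stated objective: alternative
-- what changed: Replaces the per-depth recursive generator of ascending index lists (which re-enumerates every previous depth for each depth) by a single flat loop over bitmasks 1..2^n-1, selecting each subset by bit tests and signing by popcount parity; the intersection reduce is a direct cons-style recursion instead of A's length-cased intersect_list.
import Mathlib
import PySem

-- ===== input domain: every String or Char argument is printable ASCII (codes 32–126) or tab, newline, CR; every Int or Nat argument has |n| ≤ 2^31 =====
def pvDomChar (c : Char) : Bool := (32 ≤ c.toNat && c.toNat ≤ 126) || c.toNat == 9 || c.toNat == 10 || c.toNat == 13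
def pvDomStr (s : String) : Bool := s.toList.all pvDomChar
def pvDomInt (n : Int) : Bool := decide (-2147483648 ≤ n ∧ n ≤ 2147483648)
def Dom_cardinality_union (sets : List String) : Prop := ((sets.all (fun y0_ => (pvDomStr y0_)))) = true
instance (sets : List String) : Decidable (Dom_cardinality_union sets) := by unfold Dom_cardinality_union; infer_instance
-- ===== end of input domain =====

-- B replaces A's per-depth recursive subset generator by one flat loop over bitmasks signed
-- by popcount parity (objective: alternative; same inclusion–exclusion value, no speed claim).

-- ===== PORT A =====
-- the character loop of intersect (strings handled as List Char throughout both ports)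
def interLoopA : List (Char × Char) → List Char → Option (List Char)
  | [], acc => some acc
  | (a1, a2) :: rest, acc =>
    if a1 = a2 then interLoopA rest (acc ++ [a1])
    else if a1 = 'X' then interLoopA rest (acc ++ [a2])
    else if a2 = 'X' then interLoopA rest (acc ++ [a1])
    else none

-- intersect: 'if not s1 or not s2' is 'none or empty string'
def intersectA (s1 s2 : Option (List Char)) : Option (List Char) :=
  match s1, s2 with
  | some a, some b => if a = [] ∨ b = [] then none else interLoopA (a.zip b) []
  | _, _ => none

def intersectListA : List (List Char) → Option (List Char)
  | a :: b :: c :: rest => intersectA (some a) (intersectListA (b :: c :: rest))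
  | [a, b] => intersectA (some a) (some b)
  | [a] => some a
  | [] => none

def cardinalityA : Option (List Char) → Int
  | none => 0
  | some s => if s = [] then 0 else 2 ^ (s.count 'X')

-- get_union_idxs; p.getLastD 0 is p[-1] (p is never empty); the 'depth >= sets_n' raise
-- branch is unreachable from cardinality_union (depth < len(sets)) and is not modelled
def getUnionIdxs : Nat → Nat → List (List Nat)
  | 0, n => (List.range n).map (fun i => [i])
  | d + 1, n =>
    (getUnionIdxs d n).flatMap (fun p =>
      (List.range' (p.getLastD 0 + 1) (n - (p.getLastD 0 + 1))).map (fun i => p ++ [i]))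

-- sets[i], always in range where used
def getSetA (sets : List String) (i : Nat) : List Char := (sets.getD i "").toList

def cardinality_union (sets : List String) : Int :=
  (List.range sets.length).foldl (fun rolling depth =>
    let depthSum := (getUnionIdxs depth sets.length).foldl
      (fun acc idxs => acc + cardinalityA (intersectListA (idxs.map (getSetA sets)))) 0
    if depth % 2 = 0 then rolling + depthSum else rolling - depthSum) 0

-- ===== PORT B =====
def mergeCharsB : List Char → List Char → Option (List Char)
  | x :: xs, y :: ys =>
    if x = y ∨ y = 'X' then (mergeCharsB xs ys).map (fun r => x :: r)
    else if x = 'X' then (mergeCharsB xs ys).map (fun r => y :: r)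
    else none
  | _, _ => some []

def mergeB (a b : List Char) : Option (List Char) :=
  if a = [] ∨ b = [] then none else mergeCharsB a b

-- _reduce is only called on nonempty lists; [] ↦ none
def reduceB : List (List Char) → Option (List Char)
  | [] => none
  | [a] => some a
  | a :: b :: rest =>
    match reduceB (b :: rest) with
    | none => none
    | some r => mergeB a r

def cardinality_union_alt (sets : List String) : Int :=
  let n := sets.length
  (List.range' 1 (2 ^ n - 1)).foldl (fun total mask =>
    let sel := ((List.range n).filter (fun i => (mask >>> i) % 2 == 1)).map
      (fun i => (sets.getD i "").toList)
    let size : Int :=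
      match reduceB sel with
      | none => 0
      | some s => if s = [] then 0 else 2 ^ (s.count 'X')
    if sel.length % 2 = 1 then total + size else total - size) 0

-- ===== PRECONDITION & SPEC =====
def Spec_cardinality_union (sets : List String) (out : Int) : Prop := out = cardinality_union_alt sets
instance (sets : List String) (out : Int) : Decidable (Spec_cardinality_union sets out) := by unfold Spec_cardinality_union; infer_instance

-- ===== CLAIM (what is proved, stated in full; the proofs are below) =====
def Claim_equal_cardinality_union : Prop := ∀ (sets : List String), Dom_cardinality_union sets → Spec_cardinality_union sets (cardinality_union sets)

-- ===== LEMMAS AND PROOFS =====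

-- the distinct bit positions below n that are set in mask, ascending (B's subset selection)
def bitsIdx (n mask : Nat) : List Nat :=
  (List.range n).filter (fun i => (mask >>> i) % 2 == 1)

theorem interLoop_eq_mergeChars : ∀ (a b acc : List Char),
    interLoopA (a.zip b) acc = (mergeCharsB a b).map (fun r => acc ++ r) := by
  intro a
  induction a with
  | nil => intro b acc; simp [interLoopA, mergeCharsB]
  | cons x xs ih =>
    intro b acc
    cases b with
    | nil => simp [interLoopA, mergeCharsB]
    | cons y ys =>
      simp only [List.zip_cons_cons, interLoopA, mergeCharsB]
      by_cases hxy : x = y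
      · subst hxy
        simp only [ih]
        cases mergeCharsB xs ys <;> simp
      · by_cases hy : y = 'X'
        · subst hy
          simp only [if_neg hxy]
          by_cases hx : x = 'X'
          · exact absurd hx hxy
          · simp only [ih]
            cases mergeCharsB xs ys <;> simp
        · by_cases hx : x = 'X'
          · subst hx
            simp only [if_neg hxy, if_neg (by tauto : ¬('X' = y ∨ y = 'X')), ih]
            cases mergeCharsB xs ys <;> simp
          · simp [if_neg hxy, if_neg hx, if_neg hy, if_neg (by tauto : ¬(x = y ∨ y = 'X'))]

theorem intersectA_eq_mergeB (a b : List Char) :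
    intersectA (some a) (some b) = mergeB a b := by
  simp only [intersectA, mergeB]
  split_ifs with h
  · rfl
  · rw [interLoop_eq_mergeChars]
    cases mergeCharsB a b <;> simp

theorem intersectListA_eq_reduceB : ∀ l, intersectListA l = reduceB l := by
  intro l
  induction l with
  | nil => rfl
  | cons a tl ih =>
    cases tl with
    | nil => rfl
    | cons b tl' =>
      cases tl' with
      | nil =>
        simp only [intersectListA, reduceB]
        rw [intersectA_eq_mergeB]
      | cons c rest =>
        show intersectA (some a) (intersectListA (b :: c :: rest)) = _
        rw [ih]
        conv_rhs => rw [reduceB]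
        cases h : reduceB (b :: c :: rest) with
        | none => simp [intersectA]
        | some r => simp [intersectA_eq_mergeB]

theorem sum_map_neg_int {α : Type} (l : List α) (f : α → Int) :
    (l.map (fun x => -f x)).sum = -(l.map f).sum := by
  induction l with
  | nil => simp
  | cons a tl ih => simp [ih]; ring

theorem foldl_if_add_sub {α : Type} (P : α → Prop) [DecidablePred P] (g : α → Int) :
    ∀ (l : List α) (a : Int),
    l.foldl (fun r x => if P x then r + g x else r - g x) a
      = a + (l.map (fun x => if P x then g x else -g x)).sum := by
  intro l
  induction l with
  | nil => simp
  | cons x tl ih =>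
    intro a
    simp only [List.foldl_cons, List.map_cons, List.sum_cons, ih]
    split_ifs <;> ring

theorem bitsIdx_zero (n : Nat) : bitsIdx n 0 = [] := by
  simp [bitsIdx]

theorem getUnionIdxs_length : ∀ (d n : Nat) (p : List Nat),
    p ∈ getUnionIdxs d n → p.length = d + 1 := by
  intro d
  induction d with
  | zero => intro n p hp; simp [getUnionIdxs] at hp; obtain ⟨i, _, rfl⟩ := hp; rfl
  | succ d ih =>
    intro n p hp
    simp only [getUnionIdxs, List.mem_flatMap, List.mem_map] at hp
    obtain ⟨q, hq, i, _, rfl⟩ := hp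
    simp [ih n q hq]

theorem getUnionIdxs_last_ge : ∀ (d n : Nat) (p : List Nat),
    p ∈ getUnionIdxs d n → d ≤ p.getLastD 0 := by
  intro d
  induction d with
  | zero => intro n p hp; omega
  | succ d ih =>
    intro n p hp
    simp only [getUnionIdxs, List.mem_flatMap, List.mem_map] at hp
    obtain ⟨q, hq, i, hi, rfl⟩ := hp
    have := List.mem_range'_1.mp hi
    have := ih n q hq
    simp only [List.getLastD_concat]
    omega

theorem getUnionIdxs_last_lt : ∀ (d n : Nat) (p : List Nat),
    p ∈ getUnionIdxs d n → p.getLastD 0 < n := by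
  intro d
  induction d with
  | zero =>
    intro n p hp; simp [getUnionIdxs] at hp
    obtain ⟨i, hi, rfl⟩ := hp; simpa using hi
  | succ d ih =>
    intro n p hp
    simp only [getUnionIdxs, List.mem_flatMap, List.mem_map] at hp
    obtain ⟨q, hq, i, hi, rfl⟩ := hp
    have := List.mem_range'_1.mp hi
    simp only [List.getLastD_concat]
    omega

theorem getUnionIdxs_self_nil (n : Nat) : getUnionIdxs n n = [] := by
  cases n with
  | zero => rfl
  | succ m =>
    simp only [getUnionIdxs]
    rw [List.flatMap_eq_nil_iff]
    intro p hp
    have h1 := getUnionIdxs_last_ge m (m + 1) p hp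
    have h0 : m + 1 - (p.getLastD 0 + 1) = 0 := by omega
    rw [h0]
    rfl

def endings : Nat → Nat → List (List Nat)
  | 0, n => [[n]]
  | d + 1, n => (getUnionIdxs d n).map (· ++ [n])

theorem endings_last (d n : Nat) (q : List Nat) (hq : q ∈ endings d n) :
    q.getLastD 0 = n := by
  cases d with
  | zero => simp [endings] at hq; simp [hq]
  | succ d =>
    simp only [endings, List.mem_map] at hq
    obtain ⟨p, _, rfl⟩ := hq
    exact List.getLastD_concat ..

theorem getUnionIdxs_succ_perm : ∀ (d n : Nat),
    (getUnionIdxs d (n + 1)).Perm (getUnionIdxs d n ++ endings d n) := by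
  intro d
  induction d with
  | zero =>
    intro n
    simp only [getUnionIdxs, endings, List.range_succ, List.map_append]
    rfl
  | succ d ih =>
    intro n
    show (getUnionIdxs (d+1) (n+1)).Perm _
    simp only [getUnionIdxs]
    refine ((List.Perm.flatMap_right _ (ih n)).trans ?_)
    rw [List.flatMap_append]
    have hend : (endings d n).flatMap (fun p =>
        (List.range' (p.getLastD 0 + 1) (n + 1 - (p.getLastD 0 + 1))).map (fun i => p ++ [i])) = [] := by
      rw [List.flatMap_eq_nil_iff]
      intro q hq
      rw [endings_last d n q hq]
      simp
    rw [hend, List.append_nil]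
    have hsplit : ∀ p ∈ getUnionIdxs d n,
        (List.range' (p.getLastD 0 + 1) (n + 1 - (p.getLastD 0 + 1))).map (fun i => p ++ [i])
        = (List.range' (p.getLastD 0 + 1) (n - (p.getLastD 0 + 1))).map (fun i => p ++ [i]) ++ [p ++ [n]] := by
      intro p hp
      have hlt := getUnionIdxs_last_lt d n p hp
      have h1 : n + 1 - (p.getLastD 0 + 1) = (n - (p.getLastD 0 + 1)) + 1 := by omega
      rw [h1, List.range'_1_concat]
      have h2 : p.getLastD 0 + 1 + (n - (p.getLastD 0 + 1)) = n := by omega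
      rw [h2, List.map_append]
      rfl
    have hcongr : (getUnionIdxs d n).flatMap (fun p =>
        (List.range' (p.getLastD 0 + 1) (n + 1 - (p.getLastD 0 + 1))).map (fun i => p ++ [i]))
        = (getUnionIdxs d n).flatMap (fun p =>
        ((List.range' (p.getLastD 0 + 1) (n - (p.getLastD 0 + 1))).map (fun i => p ++ [i])) ++ [p ++ [n]]) := by
      simp only [List.flatMap_def]
      congr 1
      exact List.map_congr_left hsplit
    rw [hcongr]
    refine (List.flatMap_append_perm (getUnionIdxs d n) _ _).symm.trans ?_
    apply List.Perm.append (List.Perm.refl _)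
    rw [← List.map_eq_flatMap]
    exact List.Perm.refl _

theorem bitsIdx_succ_of_lt {mask n : Nat} (h : mask < 2 ^ n) :
    bitsIdx (n + 1) mask = bitsIdx n mask := by
  simp only [bitsIdx, List.range_succ, List.filter_append]
  have hz : mask >>> n = 0 := by
    rw [Nat.shiftRight_eq_div_pow]
    exact Nat.div_eq_of_lt h
  simp [hz]

theorem bitsIdx_succ_add {m n : Nat} (h : m < 2 ^ n) :
    bitsIdx (n + 1) (2 ^ n + m) = bitsIdx n m ++ [n] := by
  simp only [bitsIdx, List.range_succ, List.filter_append]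
  have hbits : ∀ i < n, (2 ^ n + m) >>> i % 2 = m >>> i % 2 := by
    intro i hi
    rw [Nat.shiftRight_eq_div_pow, Nat.shiftRight_eq_div_pow]
    have hpow : 2 ^ n = 2 ^ (n - i) * 2 ^ i := by
      rw [← pow_add]; congr 1; omega
    rw [hpow, Nat.add_comm, Nat.add_mul_div_right _ _ (Nat.two_pow_pos i)]
    have h2 : 2 ^ (n - i) = 2 * 2 ^ (n - i - 1) := by
      rw [← pow_succ']; congr 1; omega
    omega
  have hn : (2 ^ n + m) >>> n % 2 = 1 := by
    rw [Nat.shiftRight_eq_div_pow, Nat.add_comm,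
        Nat.add_div_right _ (Nat.two_pow_pos n), Nat.div_eq_of_lt h]
  have h1 : List.filter (fun i => (2 ^ n + m) >>> i % 2 == 1) (List.range n)
      = List.filter (fun i => m >>> i % 2 == 1) (List.range n) := by
    apply List.filter_congr
    intro i hi
    rw [hbits i (List.mem_range.mp hi)]
  rw [h1, List.filter_cons, List.filter_nil]
  simp [hn]

theorem key_exchange : ∀ (n : Nat) (h : List Nat → Int),
    ((List.range n).map (fun d => ((getUnionIdxs d n).map h).sum)).sum
      = ((List.range' 1 (2 ^ n - 1)).map (fun mask => h (bitsIdx n mask))).sum := by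
  intro n
  induction n with
  | zero => intro h; simp
  | succ n ih =>
    intro h
    have hp : 0 < 2 ^ n := Nat.two_pow_pos n
    have h2 : 2 ^ (n + 1) = 2 ^ n + 2 ^ n := by rw [pow_succ]; omega
    -- LHS: split each depth by the perm lemma
    have hA : ∀ d : Nat, ((getUnionIdxs d (n + 1)).map h).sum
        = ((getUnionIdxs d n).map h).sum + ((endings d n).map h).sum := by
      intro d
      rw [((getUnionIdxs_succ_perm d n).map h).sum_eq]
      rw [List.map_append, List.sum_append]
    calc ((List.range (n + 1)).map (fun d => ((getUnionIdxs d (n + 1)).map h).sum)).sum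
        = ((List.range (n + 1)).map (fun d =>
            ((getUnionIdxs d n).map h).sum + ((endings d n).map h).sum)).sum := by
          simp only [hA]
      _ = ((List.range (n + 1)).map (fun d => ((getUnionIdxs d n).map h).sum)).sum
          + ((List.range (n + 1)).map (fun d => ((endings d n).map h).sum)).sum :=
          PySem.List.sum_map_add_int _ _ _
      _ = ((List.range n).map (fun d => ((getUnionIdxs d n).map h).sum)).sum
          + (h [n] + ((List.range n).map (fun d =>
              ((getUnionIdxs d n).map (fun p => h (p ++ [n]))).sum)).sum) := by
          congr 1
          · rw [List.range_succ, List.map_append, List.sum_append]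
            simp [getUnionIdxs_self_nil]
          · rw [List.range_succ_eq_map, List.map_cons, List.sum_cons, List.map_map]
            congr 1
            · simp [endings]
            · congr 1
              apply List.map_congr_left
              intro d _
              simp [endings, Function.comp, List.map_map, Function.comp_def]
      _ = ((List.range' 1 (2 ^ n - 1)).map (fun mask => h (bitsIdx n mask))).sum
          + (h [n] + ((List.range' 1 (2 ^ n - 1)).map (fun mask =>
              h (bitsIdx n mask ++ [n]))).sum) := by
          rw [ih h, ih (fun p => h (p ++ [n]))]
      _ = ((List.range' 1 (2 ^ (n + 1) - 1)).map (fun mask => h (bitsIdx (n + 1) mask))).sum := by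
          have hsplit : List.range' 1 (2 ^ (n + 1) - 1)
              = List.range' 1 (2 ^ n - 1) ++ List.range' (2 ^ n) (2 ^ n) := by
            rw [show 2 ^ (n + 1) - 1 = (2 ^ n - 1) + 2 ^ n by omega]
            rw [← List.range'_append_1, show 1 + (2 ^ n - 1) = 2 ^ n by omega]
          rw [hsplit, List.map_append, List.sum_append]
          congr 1
          · apply congrArg
            apply List.map_congr_left
            intro mask hm
            have := List.mem_range'_1.mp hm
            rw [bitsIdx_succ_of_lt (by omega)]
          · symm
            rw [List.range'_eq_map_range, List.map_map]
            have hmap : (List.range (2 ^ n)).map ((fun mask => h (bitsIdx (n + 1) mask)) ∘ (fun x => 2 ^ n + x))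
                = (List.range (2 ^ n)).map (fun m => h (bitsIdx n m ++ [n])) := by
              apply List.map_congr_left
              intro m hm
              simp only [Function.comp]
              rw [bitsIdx_succ_add (List.mem_range.mp hm)]
            rw [hmap]
            rw [List.range_eq_range', show 2 ^ n = (2 ^ n - 1) + 1 by omega, List.range'_succ]
            rw [List.map_cons, List.sum_cons, bitsIdx_zero]
            simp [List.range'_eq_map_range, List.map_map]

theorem final_eq (sets : List String) : cardinality_union sets = cardinality_union_alt sets := by
  have hcard : ∀ o : Option (List Char),
      (match o with
        | none => (0 : Int)
        | some s => if s = [] then 0 else 2 ^ s.count 'X') = cardinalityA o := by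
    intro o; cases o <;> rfl
  simp only [cardinality_union, cardinality_union_alt]
  rw [foldl_if_add_sub (fun d => d % 2 = 0)
        (fun depth => (getUnionIdxs depth sets.length).foldl
          (fun acc idxs => acc + cardinalityA (intersectListA (idxs.map (getSetA sets)))) 0)]
  rw [foldl_if_add_sub
        (fun mask => (((List.range sets.length).filter (fun i => (mask >>> i) % 2 == 1)).map
          (fun i => (sets.getD i "").toList)).length % 2 = 1)
        (fun mask =>
          match reduceB (((List.range sets.length).filter (fun i => (mask >>> i) % 2 == 1)).map
            (fun i => (sets.getD i "").toList)) with
          | none => (0 : Int)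
          | some s => if s = [] then 0 else 2 ^ s.count 'X')]
  simp only [zero_add, PySem.List.foldl_add]
  -- A side: depth sign → length sign, then key_exchange
  have hA : ∀ d : Nat,
      (if d % 2 = 0
        then ((getUnionIdxs d sets.length).map
          (fun idxs => cardinalityA (intersectListA (idxs.map (getSetA sets))))).sum
        else -((getUnionIdxs d sets.length).map
          (fun idxs => cardinalityA (intersectListA (idxs.map (getSetA sets))))).sum)
      = ((getUnionIdxs d sets.length).map (fun p =>
          if p.length % 2 = 1
          then cardinalityA (intersectListA (p.map (getSetA sets)))
          else -cardinalityA (intersectListA (p.map (getSetA sets))))).sum := by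
    intro d
    by_cases hdp : d % 2 = 0
    · rw [if_pos hdp]
      apply congrArg
      apply List.map_congr_left
      intro p hp
      have hl := getUnionIdxs_length d sets.length p hp
      rw [if_pos (by omega : p.length % 2 = 1)]
    · rw [if_neg hdp, ← sum_map_neg_int]
      apply congrArg
      apply List.map_congr_left
      intro p hp
      have hl := getUnionIdxs_length d sets.length p hp
      rw [if_neg (by omega : ¬ p.length % 2 = 1)]
  simp only [hA]
  rw [key_exchange sets.length (fun p =>
      if p.length % 2 = 1
      then cardinalityA (intersectListA (p.map (getSetA sets)))
      else -cardinalityA (intersectListA (p.map (getSetA sets))))]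
  -- B side: identify each mask term
  apply congrArg
  apply List.map_congr_left
  intro mask _
  have hsel : ((List.range sets.length).filter (fun i => (mask >>> i) % 2 == 1)).map
      (fun i => (sets.getD i "").toList) = (bitsIdx sets.length mask).map (getSetA sets) := by
    rfl
  rw [hcard, hsel, ← intersectListA_eq_reduceB, List.length_map]

-- ===== VERDICT (by name: the statement is the Claim_ definition above) =====
theorem cardinality_union_spec : Claim_equal_cardinality_union := by
  intro sets _
  show cardinality_union sets = cardinality_union_alt sets
  exact final_eq sets
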